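-- pv_equiv track=rewrite | github.com/william-fecteau/AdventOfCode2021 | days/day10.py | checkForSyntaxErrorRec
-- ===== SOURCE A (Python) =====
-- def checkForSyntaxErrorRec(line, parentChar, parentIndex):
--     openingChars = ['(', '[', '{', '<']
--     closingChars = [')', ']', '}', '>']
--
--     closeParent = closingChars[openingChars.index(parentChar)]
--
--     # Loop until we close the parent char or until the end of the line
--     curIndex = parentIndex + 1
--     while curIndex < len(line) and line[curIndex] != closeParent:
--         # If we find another closingChars, its a syntax error
--         if line[curIndex] in closingChars:
--             return (True, curIndex)
--
--         # Check syntax of the nested chunk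
--         isSyntaxError, index = checkForSyntaxErrorRec(line, line[curIndex], curIndex)
--         if (isSyntaxError):
--             return (True, index)
--
--         # If there is no syntax error in the nested chunk, continue looping at the end of it
--         curIndex = index + 1
--
--     # We reached the end of this chunk, return that there was no syntax error and the index of the closeParent
--     return (False, curIndex)
-- ===== SOURCE B (Python) =====
-- def checkForSyntaxErrorRec(line, parentChar, parentIndex):
--     openingChars = ['(', '[', '{', '<']
--     closingChars = [')', ']', '}', '>']
--
--     # explicit stack of expected closing brackets instead of recursion
--     stack = [closingChars[openingChars.index(parentChar)]]
--     idx = parentIndex + 1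
--     while idx < len(line):
--         c = line[idx]
--         if c == stack[-1]:
--             stack.pop()
--             if not stack:
--                 return (False, idx)
--         elif c in closingChars:
--             return (True, idx)
--         else:
--             stack.append(closingChars[openingChars.index(c)])
--         idx += 1
--     return (False, idx)
-- ===== Notes on version B (the rewrite author's own statement) =====
-- stated objective: alternative
-- what changed: Replaces A's nested recursion (one call per bracket chunk, resuming the loop at the index the callee returns) with a single non-recursive left-to-right scan that keeps an explicit stack of expected closing brackets.
-- intended difference: On inputs where the scan runs off the end of the line with at least two brackets still unclosed, A returns (False, len(line)+depth-1) - an index past the end of the line produced by its unwinding recursion - while B returns (False, len(line)), the index where the scan actually stopped, which is the intended 'reached end of line' result. — e.g. on checkForSyntaxErrorRec("([", "(", 0): A returns (false, 3), B returns (false, 2)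
import Mathlib
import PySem

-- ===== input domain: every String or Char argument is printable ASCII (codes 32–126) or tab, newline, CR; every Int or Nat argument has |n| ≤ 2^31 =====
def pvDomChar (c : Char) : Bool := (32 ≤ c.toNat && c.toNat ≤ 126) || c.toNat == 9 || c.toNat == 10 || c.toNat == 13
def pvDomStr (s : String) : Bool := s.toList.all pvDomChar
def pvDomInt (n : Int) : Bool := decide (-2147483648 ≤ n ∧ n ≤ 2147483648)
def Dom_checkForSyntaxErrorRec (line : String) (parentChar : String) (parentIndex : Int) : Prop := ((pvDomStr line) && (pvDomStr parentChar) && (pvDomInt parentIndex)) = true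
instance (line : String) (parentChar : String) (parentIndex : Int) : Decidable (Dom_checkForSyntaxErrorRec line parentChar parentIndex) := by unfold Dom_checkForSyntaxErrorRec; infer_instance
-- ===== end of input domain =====

-- B replaces A's nested recursion by a single iterative scan with an explicit stack of
-- expected closing brackets (objective: alternative); on lines ending with ≥ 2 unclosed
-- brackets B's end index differs from A's (see D_ below).

-- shared helpers: closingChars[openingChars.index(c)] and membership in closingChars
def pvCloseC (c : Char) : Option Char :=
  if c = '(' then some ')'
  else if c = '[' then some ']'
  else if c = '{' then some '}'
  else if c = '<' then some '>'
  else none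

def pvCloseS (s : String) : Option Char :=
  if s = "(" then some ')'
  else if s = "[" then some ']'
  else if s = "{" then some '}'
  else if s = "<" then some '>'
  else none

def pvIsClosing (c : Char) : Bool :=
  c = ')' || c = ']' || c = '}' || c = '>'

-- ===== PORT A =====
-- A's recursion with the while-loop; the subtype bound i ≤ result.2 is only a termination
-- guard. Where A raises (IndexError / ValueError) the port returns (true, i); those inputs
-- are excluded by Pre_ below.
lemma pvStepLe {i j : Int} (hj : i + 1 ≤ j) : i ≤ j := by omega
lemma pvJumpLe {i j k : Int} (hj : i + 1 ≤ j) (hk : j + 1 ≤ k) : i ≤ k := by omega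
lemma pvDecStep {len i : Int} (h : i < len) : (len - (i + 1)).toNat < (len - i).toNat := by omega
lemma pvDecJump {len i j : Int} (h : i < len) (hj : i + 1 ≤ j) :
    (len - (j + 1)).toNat < (len - i).toNat := by omega

def pvGoA (chars : List Char) (cp : Char) (i : Int) : {p : Bool × Int // i ≤ p.2} :=
  if h : i < (chars.length : Int) then
    match PySem.List.pyGet? chars i with
    | none => ⟨(true, i), le_refl i⟩
    | some ch =>
      if ch = cp then ⟨(false, i), le_refl i⟩
      else if pvIsClosing ch then ⟨(true, i), le_refl i⟩
      else
        match pvCloseC ch with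
        | none => ⟨(true, i), le_refl i⟩
        | some cp' =>
          match pvGoA chars cp' (i + 1) with
          | ⟨(true, j), hj⟩ => ⟨(true, j), pvStepLe hj⟩
          | ⟨(false, j), hj⟩ =>
            let r := pvGoA chars cp (j + 1)
            ⟨r.val, pvJumpLe hj r.property⟩
  else ⟨(false, i), le_refl i⟩
termination_by ((chars.length : Int) - i).toNat
decreasing_by
  · exact pvDecStep h
  · exact pvDecJump h hj

def checkForSyntaxErrorRec (line : String) (parentChar : String) (parentIndex : Int) : Bool × Int :=
  match pvCloseS parentChar with
  | none => (true, parentIndex)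
  | some cp => (pvGoA line.toList cp (parentIndex + 1)).val

-- ===== PORT B =====
-- Source B's loop; the stack is (top :: rest), top = Python's stack[-1]; raise paths as in A's port.
def pvGoB (chars : List Char) (top : Char) (rest : List Char) (i : Int) : Bool × Int :=
  if h : i < (chars.length : Int) then
    match PySem.List.pyGet? chars i with
    | none => (true, i)
    | some ch =>
      if ch = top then
        match rest with
        | [] => (false, i)
        | t :: r => pvGoB chars t r (i + 1)
      else if pvIsClosing ch then (true, i)
      else
        match pvCloseC ch with
        | none => (true, i)
        | some cp' => pvGoB chars cp' (top :: rest) (i + 1)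
  else (false, i)
termination_by ((chars.length : Int) - i).toNat
decreasing_by
  · exact pvDecStep h
  · exact pvDecStep h

def checkForSyntaxErrorRec_alt (line : String) (parentChar : String) (parentIndex : Int) : Bool × Int :=
  match pvCloseS parentChar with
  | none => (true, parentIndex)
  | some cp => pvGoB line.toList cp [] (parentIndex + 1)

-- ===== PRECONDITION & SPEC =====
-- Pre_ = exactly the inputs on which Python A returns: parentChar is one of the four opening
-- brackets, and the scanned stretch of the line neither starts out of range (IndexError) nor
-- reaches a non-bracket character before A stops (ValueError of openingChars.index).
def pvScanOk : List Char → List Char → Bool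
  | _, [] => true
  | [], _ => true
  | ch :: restLine, top :: s =>
    if ch = top then (if s.isEmpty then true else pvScanOk restLine s)
    else if pvIsClosing ch then true
    else
      match pvCloseC ch with
      | none => false
      | some cp => pvScanOk restLine (cp :: top :: s)

-- the character sequence Python reads scanning from position i (negative i wraps per access)
def pvE (chars : List Char) (i : Int) : List Char :=
  if i < 0 then chars.drop ((chars.length : Int) + i).toNat ++ chars else chars.drop i.toNat

def pvOk (chars : List Char) (cp : Char) (i0 : Int) : Bool :=
  if (chars.length : Int) ≤ i0 then true
  else if i0 < -(chars.length : Int) then false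
  else pvScanOk (pvE chars i0) [cp]

def Pre_checkForSyntaxErrorRec (line : String) (parentChar : String) (parentIndex : Int) : Prop :=
  (match pvCloseS parentChar with
   | none => false
   | some cp => pvOk line.toList cp (parentIndex + 1)) = true
instance (line : String) (parentChar : String) (parentIndex : Int) : Decidable (Pre_checkForSyntaxErrorRec line parentChar parentIndex) := by unfold Pre_checkForSyntaxErrorRec; infer_instance

def pvWitness_checkForSyntaxErrorRec : String × String × Int := ("(<>)", "(", 0)

-- On inputs where the scan runs off the end of the line with at least two brackets still
-- unclosed, A returns (False, len(line)+depth-1) — an index past the end of the line produced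
-- by its unwinding recursion — while B returns (False, len(line)), the index where the scan
-- actually stopped, which is the intended 'reached end of line' result.
def pvExh : List Char → List Char → Bool
  | [], s => decide (2 ≤ s.length)
  | _ :: _, [] => false
  | ch :: restLine, top :: s =>
    if ch = top then !s.isEmpty && pvExh restLine s
    else
      match pvCloseC ch with
      | none => false
      | some cp => pvExh restLine (cp :: top :: s)

def D_checkForSyntaxErrorRec (line : String) (parentChar : String) (parentIndex : Int) : Prop :=
  (match pvCloseS parentChar with
   | none => false
   | some cp =>
     decide (-(line.toList.length : Int) ≤ parentIndex + 1 ∧ parentIndex + 1 < (line.toList.length : Int)) &&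
     pvExh (pvE line.toList (parentIndex + 1)) [cp]) = true
instance (line : String) (parentChar : String) (parentIndex : Int) : Decidable (D_checkForSyntaxErrorRec line parentChar parentIndex) := by unfold D_checkForSyntaxErrorRec; infer_instance

def Spec_checkForSyntaxErrorRec (line : String) (parentChar : String) (parentIndex : Int) (out : Bool × Int) : Prop := ¬ D_checkForSyntaxErrorRec line parentChar parentIndex → out = checkForSyntaxErrorRec_alt line parentChar parentIndex
instance (line : String) (parentChar : String) (parentIndex : Int) (out : Bool × Int) : Decidable (Spec_checkForSyntaxErrorRec line parentChar parentIndex out) := by unfold Spec_checkForSyntaxErrorRec; infer_instance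

def pvDiffWitness_checkForSyntaxErrorRec : String × String × Int := ("([", "(", 0)
def pvDiffWitnessOut_checkForSyntaxErrorRec : (Bool × Int) × (Bool × Int) := ((false, 3), (false, 2))

-- ===== CLAIM (what is proved, stated in full; the proofs are below) =====
def Claim_unchanged_checkForSyntaxErrorRec : Prop := ∀ (line : String) (parentChar : String) (parentIndex : Int), Dom_checkForSyntaxErrorRec line parentChar parentIndex → Pre_checkForSyntaxErrorRec line parentChar parentIndex → Spec_checkForSyntaxErrorRec line parentChar parentIndex (checkForSyntaxErrorRec line parentChar parentIndex)
def Claim_changed_checkForSyntaxErrorRec : Prop := Dom_checkForSyntaxErrorRec (pvDiffWitness_checkForSyntaxErrorRec.1) (pvDiffWitness_checkForSyntaxErrorRec.2.1) (pvDiffWitness_checkForSyntaxErrorRec.2.2) ∧ Pre_checkForSyntaxErrorRec (pvDiffWitness_checkForSyntaxErrorRec.1) (pvDiffWitness_checkForSyntaxErrorRec.2.1) (pvDiffWitness_checkForSyntaxErrorRec.2.2) ∧ D_checkForSyntaxErrorRec (pvDiffWitness_checkForSyntaxErrorRec.1) (pvDiffWitness_checkForSyntaxErrorRec.2.1) (pvDiffWitness_checkForSyntaxErrorRec.2.2)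 ∧ checkForSyntaxErrorRec (pvDiffWitness_checkForSyntaxErrorRec.1) (pvDiffWitness_checkForSyntaxErrorRec.2.1) (pvDiffWitness_checkForSyntaxErrorRec.2.2) = pvDiffWitnessOut_checkForSyntaxErrorRec.1 ∧ checkForSyntaxErrorRec_alt (pvDiffWitness_checkForSyntaxErrorRec.1) (pvDiffWitness_checkForSyntaxErrorRec.2.1) (pvDiffWitness_checkForSyntaxErrorRec.2.2) = pvDiffWitnessOut_checkForSyntaxErrorRec.2 ∧ pvDiffWitnessOut_checkForSyntaxErrorRec.1 ≠ pvDiffWitnessOut_checkForSyntaxErrorRec.2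
def Claim_exact_checkForSyntaxErrorRec : Prop := ∀ (line : String) (parentChar : String) (parentIndex : Int), Dom_checkForSyntaxErrorRec line parentChar parentIndex → Pre_checkForSyntaxErrorRec line parentChar parentIndex → D_checkForSyntaxErrorRec line parentChar parentIndex → checkForSyntaxErrorRec line parentChar parentIndex ≠ checkForSyntaxErrorRec_alt line parentChar parentIndex

-- ===== LEMMAS AND PROOFS =====

-- A-side composite: run A's loop for the innermost pending bracket, then continue with the
-- rest of the pending stack at the returned index (mirrors how A's recursion unwinds).
def pvCombA (chars : List Char) : List Char → Char → Int → Bool × Int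
  | [], cp, i => (pvGoA chars cp i).val
  | c' :: s', cp, i =>
    let r := (pvGoA chars cp i).val
    if r.1 then r else pvCombA chars s' c' (r.2 + 1)

lemma pvGoA_ge_len (chars : List Char) (cp : Char) (i : Int)
    (h : (chars.length : Int) ≤ i) : (pvGoA chars cp i).val = (false, i) := by
  rw [pvGoA.eq_def]
  simp [show ¬ i < (chars.length : Int) by omega]

lemma pvGoB_ge_len (chars : List Char) (top : Char) (rest : List Char) (i : Int)
    (h : (chars.length : Int) ≤ i) : pvGoB chars top rest i = (false, i) := by
  rw [pvGoB.eq_def]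
  simp [show ¬ i < (chars.length : Int) by omega]

lemma pvCombA_ge_len (chars : List Char) (s : List Char) (cp : Char) (i : Int)
    (h : (chars.length : Int) ≤ i) :
    pvCombA chars s cp i = (false, i + s.length) := by
  induction s generalizing cp i with
  | nil => simp [pvCombA, pvGoA_ge_len chars cp i h]
  | cons c' s' ih =>
    simp only [pvCombA, pvGoA_ge_len chars cp i h]
    rw [ih c' (i + 1) (by omega)]
    simp; omega

lemma pvCombA_of_true (chars : List Char) (s : List Char) (cp : Char) (i : Int)
    (h : (pvGoA chars cp i).val.1 = true) :
    pvCombA chars s cp i = (pvGoA chars cp i).val := by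
  cases s <;> simp [pvCombA, h]

lemma pvCombA_congr (chars : List Char) (s : List Char) (cp : Char) (i i' : Int)
    (h : (pvGoA chars cp i).val = (pvGoA chars cp i').val) :
    pvCombA chars s cp i = pvCombA chars s cp i' := by
  cases s <;> simp [pvCombA, h]

-- pushing an opener: A's recursion step, seen on the composite
lemma pvCombA_open (chars : List Char) (rest : List Char) (top ch cp' : Char) (i : Int)
    (h : i < (chars.length : Int)) (hg : PySem.List.pyGet? chars i = some ch)
    (hch : ¬ ch = top) (hcl : ¬ pvIsClosing ch = true) (hcc : pvCloseC ch = some cp') :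
    pvCombA chars rest top i = pvCombA chars (top :: rest) cp' (i + 1) := by
  rcases hr : pvGoA chars cp' (i + 1) with ⟨⟨b, j⟩, hj⟩
  cases b with
  | true =>
    have hAv : (pvGoA chars top i).val = (true, j) := by
      rw [pvGoA.eq_def]; simp only [h, dif_pos, hg]
      simp only [hch, if_neg, not_false_iff, hcl, Bool.false_eq_true, hcc, hr]
    rw [pvCombA_of_true chars rest top i (by rw [hAv])]
    simp [pvCombA, hr, hAv]
  | false =>
    have hAv : (pvGoA chars top i).val = (pvGoA chars top (j + 1)).val := by
      rw [pvGoA.eq_def]; simp only [h, dif_pos, hg]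
      simp only [hch, if_neg, not_false_iff, hcl, Bool.false_eq_true, hcc, hr]
    rw [pvCombA_congr chars rest top i (j + 1) hAv]
    simp only [pvCombA, hr]
    cases rest <;> simp [pvCombA]

lemma pvE_nil (chars : List Char) : pvE chars (chars.length : Int) = [] := by
  simp [pvE, show ¬ ((chars.length : Int) < 0) by omega]

lemma pvE_cons (chars : List Char) (i : Int) (h1 : -(chars.length : Int) ≤ i)
    (h2 : i < (chars.length : Int)) :
    ∃ ch, PySem.List.pyGet? chars i = some ch ∧ pvE chars i = ch :: pvE chars (i + 1) := by
  by_cases hn : i < 0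
  · have hk : ((chars.length : Int) + i).toNat < chars.length := by omega
    refine ⟨chars[((chars.length : Int) + i).toNat], ?_, ?_⟩
    · have hidx : PySem.List.pyIdx? chars.length i = some (((chars.length : Int) + i).toNat) := by
        simp only [PySem.List.pyIdx?]
        rw [if_neg (by omega), if_pos (by omega)]
        congr 1; omega
      simp only [PySem.List.pyGet?, hidx, Option.bind_some]
      exact List.getElem?_eq_getElem hk
    · have hdrop : chars.drop ((chars.length : Int) + i).toNat =
          chars[((chars.length : Int) + i).toNat] :: chars.drop (((chars.length : Int) + i).toNat + 1) :=
        List.drop_eq_getElem_cons hk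
      by_cases hn1 : i + 1 < 0
      · have hdd : ((chars.length : Int) + i).toNat + 1 = ((chars.length : Int) + (i + 1)).toNat := by omega
        simp only [pvE, hn, if_pos, hn1]
        rw [hdrop, hdd]
        simp [List.cons_append]
      · have hi1 : i = -1 := by omega
        subst hi1
        simp only [pvE, hn, if_pos, hn1, if_neg, not_false_iff]
        rw [hdrop]
        have : chars.drop (((chars.length : Int) + -1).toNat + 1) = [] := by
          apply List.drop_eq_nil_of_le; omega
        rw [this]
        simp only [List.nil_append, List.cons_append, List.nil_append]
        norm_num
  · refine ⟨chars[i.toNat], ?_, ?_⟩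
    · rw [PySem.List.pyGet?_of_nonneg chars (by omega : (0:Int) ≤ i)]
      exact List.getElem?_eq_getElem (by omega)
    · have hdd : i.toNat + 1 = (i + 1).toNat := by omega
      simp only [pvE, hn, if_neg, not_false_iff, show ¬ i + 1 < 0 by omega]
      rw [List.drop_eq_getElem_cons (by omega : i.toNat < chars.length), hdd]

lemma pvCloseC_of_closing (c : Char) (h : pvIsClosing c = true) : pvCloseC c = none := by
  simp only [pvIsClosing, Bool.or_eq_true, decide_eq_true_eq] at h
  rcases h with ((rfl | rfl) | rfl) | rfl <;> rfl

-- main invariant: B's loop with stack (top :: rest) against A's composite, guided by pvExh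
lemma pvMain (chars : List Char) :
    ∀ (k : Nat) (top : Char) (rest : List Char) (i : Int),
      ((chars.length : Int) - i).toNat ≤ k → -(chars.length : Int) ≤ i → i ≤ (chars.length : Int) →
      (pvExh (pvE chars i) (top :: rest) = false →
        pvGoB chars top rest i = pvCombA chars rest top i) ∧
      (pvExh (pvE chars i) (top :: rest) = true →
        pvGoB chars top rest i = (false, (chars.length : Int)) ∧
        (pvCombA chars rest top i).1 = false ∧
        (chars.length : Int) + 1 ≤ (pvCombA chars rest top i).2) := by
  intro k
  induction k with
  | zero =>
    intro top rest i hk hlo hhi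
    have hlen : i = (chars.length : Int) := by omega
    subst hlen
    rw [pvE_nil, pvGoB_ge_len chars top rest _ (le_refl _),
        pvCombA_ge_len chars rest top _ (le_refl _)]
    constructor
    · intro hx
      simp only [pvExh, decide_eq_false_iff_not, List.length_cons] at hx
      have hr0 : rest = [] := List.eq_nil_of_length_eq_zero (by omega)
      subst hr0; simp
    · intro hx
      simp only [pvExh, decide_eq_true_eq, List.length_cons] at hx
      refine ⟨rfl, rfl, ?_⟩
      show (chars.length : Int) + 1 ≤ (chars.length : Int) + (rest.length : Int)
      omega
  | succ k ih =>
    intro top rest i hk hlo hhi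
    by_cases h : i < (chars.length : Int)
    case neg =>
      have hlen : i = (chars.length : Int) := by omega
      subst hlen
      rw [pvE_nil, pvGoB_ge_len chars top rest _ (le_refl _),
          pvCombA_ge_len chars rest top _ (le_refl _)]
      constructor
      · intro hx
        simp only [pvExh, decide_eq_false_iff_not, List.length_cons] at hx
        have hr0 : rest = [] := List.eq_nil_of_length_eq_zero (by omega)
        subst hr0; simp
      · intro hx
        simp only [pvExh, decide_eq_true_eq, List.length_cons] at hx
        refine ⟨rfl, rfl, ?_⟩
        show (chars.length : Int) + 1 ≤ (chars.length : Int) + (rest.length : Int)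
        omega
    case pos =>
      obtain ⟨ch, hg, hE⟩ := pvE_cons chars i hlo h
      rw [hE]
      by_cases hch : ch = top
      case pos =>
        have hAv : (pvGoA chars top i).val = (false, i) := by
          rw [pvGoA.eq_def]; simp [h, hg, hch]
        cases rest with
        | nil =>
          have hBv : pvGoB chars top [] i = (false, i) := by
            rw [pvGoB.eq_def]; simp [h, hg, hch]
          have hx1 : pvExh (ch :: pvE chars (i + 1)) [top] = false := by
            simp [pvExh, hch]
          rw [hx1]
          refine ⟨fun _ => ?_, fun hx => nomatch hx⟩
          rw [hBv]; simp [pvCombA, hAv]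
        | cons t r =>
          have hBv : pvGoB chars top (t :: r) i = pvGoB chars t r (i + 1) := by
            rw [pvGoB.eq_def]; simp [h, hg, hch]
          have hx2 : pvExh (ch :: pvE chars (i + 1)) (top :: t :: r)
              = pvExh (pvE chars (i + 1)) (t :: r) := by
            simp [pvExh, hch]
          have hCA : pvCombA chars (t :: r) top i = pvCombA chars r t (i + 1) := by
            simp [pvCombA, hAv]
          rw [hx2, hBv, hCA]
          exact ih t r (i + 1) (by omega) (by omega) (by omega)
      case neg =>
        by_cases hcl : pvIsClosing ch = true
        case pos =>
          have hAv : (pvGoA chars top i).val = (true, i) := by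
            rw [pvGoA.eq_def]; simp [h, hg, hch, hcl]
          have hBv : pvGoB chars top rest i = (true, i) := by
            rw [pvGoB.eq_def]; simp [h, hg, hch, hcl]
          have hx1 : pvExh (ch :: pvE chars (i + 1)) (top :: rest) = false := by
            cases rest <;> simp [pvExh, hch, pvCloseC_of_closing ch hcl]
          rw [hx1]
          refine ⟨fun _ => ?_, fun hx => nomatch hx⟩
          rw [pvCombA_of_true chars rest top i (by rw [hAv]), hAv, hBv]
        case neg =>
          cases hcc : pvCloseC ch with
          | none =>
            have hAv : (pvGoA chars top i).val = (true, i) := by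
              rw [pvGoA.eq_def]; simp [h, hg, hch, hcl, hcc]
            have hBv : pvGoB chars top rest i = (true, i) := by
              rw [pvGoB.eq_def]; simp [h, hg, hch, hcl, hcc]
            have hx1 : pvExh (ch :: pvE chars (i + 1)) (top :: rest) = false := by
              cases rest <;> simp [pvExh, hch, hcc]
            rw [hx1]
            refine ⟨fun _ => ?_, fun hx => nomatch hx⟩
            rw [pvCombA_of_true chars rest top i (by rw [hAv]), hAv, hBv]
          | some cp' =>
            have hBv : pvGoB chars top rest i = pvGoB chars cp' (top :: rest) (i + 1) := by
              rw [pvGoB.eq_def]; simp [h, hg, hch, hcl, hcc]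
            have hx2 : pvExh (ch :: pvE chars (i + 1)) (top :: rest)
                = pvExh (pvE chars (i + 1)) (cp' :: top :: rest) := by
              simp [pvExh, hch, hcc]
            have hCA := pvCombA_open chars rest top ch cp' i h hg hch hcl hcc
            rw [hx2, hBv, hCA]
            exact ih cp' (top :: rest) (i + 1) (by omega) (by omega) (by omega)

-- ===== VERDICT (by name: the statement is the Claim_ definition above) =====
theorem checkForSyntaxErrorRec_spec : Claim_unchanged_checkForSyntaxErrorRec := by
  intro line parentChar parentIndex _ _ hnd
  unfold D_checkForSyntaxErrorRec at hnd
  unfold checkForSyntaxErrorRec checkForSyntaxErrorRec_alt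
  cases hc : pvCloseS parentChar with
  | none => rfl
  | some cp =>
    rw [hc] at hnd
    show (pvGoA line.toList cp (parentIndex + 1)).val = pvGoB line.toList cp [] (parentIndex + 1)
    set chars := line.toList with hchars
    set i0 := parentIndex + 1 with hi0
    by_cases hge : (chars.length : Int) ≤ i0
    · rw [pvGoA_ge_len chars cp i0 hge, pvGoB_ge_len chars cp [] i0 hge]
    · by_cases hlt : i0 < -(chars.length : Int)
      · have hgn : PySem.List.pyGet? chars i0 = none := by
          rw [PySem.List.pyGet?_eq_none_iff]
          unfold PySem.Raise.InRange
          omega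
        rw [pvGoA.eq_def, pvGoB.eq_def]
        simp [show i0 < (chars.length : Int) by omega, hgn]
      · have hexh : pvExh (pvE chars i0) [cp] = false := by
          by_contra hx
          apply hnd
          simp only [Bool.not_eq_false] at hx
          simp [hx, show -(chars.length : Int) ≤ i0 by omega, show i0 < (chars.length : Int) by omega]
        have heq := (pvMain chars ((chars.length : Int) - i0).toNat cp [] i0 (le_refl _)
          (by omega) (by omega)).1 hexh
        rw [heq]
        simp [pvCombA]

theorem checkForSyntaxErrorRec_changed : Claim_changed_checkForSyntaxErrorRec := by
  unfold Claim_changed_checkForSyntaxErrorRec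
  refine ⟨by decide, by decide, by decide, ?_, ?_, by decide⟩
  · show checkForSyntaxErrorRec "([" "(" 0 = (false, 3)
    unfold checkForSyntaxErrorRec
    rw [show pvCloseS "(" = some ')' from rfl, show "([".toList = ['(', '['] from rfl]
    simp [pvGoA.eq_def, PySem.List.pyGet?, PySem.List.pyIdx?, pvCloseC, pvIsClosing]
  · show checkForSyntaxErrorRec_alt "([" "(" 0 = (false, 2)
    unfold checkForSyntaxErrorRec_alt
    rw [show pvCloseS "(" = some ')' from rfl, show "([".toList = ['(', '['] from rfl]
    simp [pvGoB.eq_def, PySem.List.pyGet?, PySem.List.pyIdx?, pvCloseC, pvIsClosing]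

theorem checkForSyntaxErrorRec_tight : Claim_exact_checkForSyntaxErrorRec := by
  intro line parentChar parentIndex _ _ hd
  unfold D_checkForSyntaxErrorRec at hd
  unfold checkForSyntaxErrorRec checkForSyntaxErrorRec_alt
  cases hc : pvCloseS parentChar with
  | none => rw [hc] at hd; simp at hd
  | some cp =>
    rw [hc] at hd
    simp only [Bool.and_eq_true, decide_eq_true_eq] at hd
    obtain ⟨⟨hlo, hhi⟩, hexh⟩ := hd
    show (pvGoA line.toList cp (parentIndex + 1)).val ≠ pvGoB line.toList cp [] (parentIndex + 1)
    have hm := (pvMain line.toList ((line.toList.length : Int) - (parentIndex + 1)).toNat cp []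
      (parentIndex + 1) (le_refl _) hlo (by omega)).2 hexh
    obtain ⟨hB, -, hA2⟩ := hm
    rw [hB]
    simp only [pvCombA] at hA2
    intro hEq
    rw [hEq] at hA2
    simp at hA2
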